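-- pv_equiv track=rewrite | github.com/TheForgottened/everything-api | app/mappers.py | map_query_params_list_to_dict
-- ===== SOURCE A (Python) =====
-- from itertools import groupby
-- from typing import Any
--
-- def map_query_params_list_to_dict(query_params: list[tuple[str, str]]) -> dict[str, list[str]]:
--     def key_func(x: tuple) -> Any:
--         return x[0]
--
--     sorted_query_params = sorted(query_params, key=key_func)
--     return {
--         query_param: list(map(lambda x: x[1], values))
--         for query_param, values in groupby(sorted_query_params, key=key_func)
--     }
-- ===== SOURCE B (Python) =====
-- def map_query_params_list_to_dict(query_params):
--     grouped = {}
--     for pair in query_params: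
--         grouped.setdefault(pair[0], []).append(pair[1])
--     return {k: grouped[k] for k in sorted(grouped)}
-- ===== Notes on version B (the rewrite author's own statement) =====
-- stated objective: alternative
-- what changed: A sorts all pairs and runs itertools.groupby over the sorted list; B groups first in one pass with setdefault/append and then sorts only the distinct keys, keeping per-key values in encounter order (equal by sort stability).
import Mathlib
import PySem

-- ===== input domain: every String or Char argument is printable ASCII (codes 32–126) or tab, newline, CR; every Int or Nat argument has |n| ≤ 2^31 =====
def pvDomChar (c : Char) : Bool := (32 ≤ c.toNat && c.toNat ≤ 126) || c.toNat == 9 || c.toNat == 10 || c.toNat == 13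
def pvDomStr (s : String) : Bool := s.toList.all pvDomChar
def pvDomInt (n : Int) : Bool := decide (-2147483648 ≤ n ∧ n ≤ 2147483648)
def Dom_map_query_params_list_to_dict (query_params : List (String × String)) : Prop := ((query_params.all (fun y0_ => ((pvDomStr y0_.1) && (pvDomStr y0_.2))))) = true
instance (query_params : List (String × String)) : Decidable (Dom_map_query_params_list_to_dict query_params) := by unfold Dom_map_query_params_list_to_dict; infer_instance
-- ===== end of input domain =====

-- B replaces A's sort-all-pairs-then-groupby with one grouping pass (setdefault/append) followed by a
-- sort of the distinct keys only (objective: alternative; same return value, proved below).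

-- ===== PORT A =====
-- itertools.groupby over the key-sorted list, ported by hand (exact: consecutive runs of equal key,
-- each group materialised as list(map(lambda x: x[1], values)))
def pvRuns : List (String × String) → List (String × List String)
  | [] => []
  | p :: rest =>
      (p.1, p.2 :: (rest.takeWhile (fun q => q.1 == p.1)).map (fun q => q.2)) ::
        pvRuns (rest.dropWhile (fun q => q.1 == p.1))
termination_by l => l.length
decreasing_by
  exact Nat.lt_succ_of_le (List.length_dropWhile_le _ _)

def map_query_params_list_to_dict (query_params : List (String × String)) : List (String × List String) :=
  let sorted_query_params := PySem.List.sorted query_params (fun x => x.1) false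
  -- the dict comprehension over the groups, built in iteration order
  ((pvRuns sorted_query_params).foldl (fun d p => d.insert p.1 p.2) PySem.Dict.empty).items

-- ===== PORT B =====
def map_query_params_list_to_dict_alt (query_params : List (String × String)) : List (String × List String) :=
  -- grouped.setdefault(pair[0], []).append(pair[1])  ==  grouped[pair[0]] = grouped.get(pair[0], []) + [pair[1]]
  let grouped := query_params.foldl (fun d p => d.modify p.1 [] (fun l => l ++ [p.2])) PySem.Dict.empty
  -- {k: grouped[k] for k in sorted(grouped)}; every such k is a key of grouped, so grouped[k] = grouped.getD k []
  (PySem.List.sorted grouped.keys (fun k => k) false).map (fun k => (k, grouped.getD k []))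

-- ===== PRECONDITION & SPEC =====
def Spec_map_query_params_list_to_dict (query_params : List (String × String)) (out : List (String × List String)) : Prop := out = map_query_params_list_to_dict_alt query_params
instance (query_params : List (String × String)) (out : List (String × List String)) : Decidable (Spec_map_query_params_list_to_dict query_params out) := by unfold Spec_map_query_params_list_to_dict; infer_instance

-- ===== CLAIM (what is proved, stated in full; the proofs are below) =====
def Claim_equal_map_query_params_list_to_dict : Prop := ∀ (query_params : List (String × String)), Dom_map_query_params_list_to_dict query_params → Spec_map_query_params_list_to_dict query_params (map_query_params_list_to_dict query_params)

-- ===== LEMMAS AND PROOFS =====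

-- Stability of Python's sort, one insertion step: inserting x into a key-sorted ys puts it after
-- every element of its own key class and does not disturb any class.
theorem pv_filter_insertBy (c : String) (x : String × String) (ys : List (String × String))
    (hys : ys.Pairwise (fun a b => a.1 ≤ b.1)) :
    (PySem.List.insertBy (fun a b => decide (a.1 < b.1)) x ys).filter (fun z => z.1 == c) =
      if x.1 = c then ys.filter (fun z => z.1 == c) ++ [x] else ys.filter (fun z => z.1 == c) := by
  induction ys with
  | nil =>
      by_cases h : x.1 = c <;> simp [PySem.List.insertBy, h]
  | cons y ys ih =>
      rcases List.pairwise_cons.mp hys with ⟨hy, hys'⟩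
      by_cases hlt : x.1 < y.1
      · simp only [PySem.List.insertBy, hlt, decide_true, if_true]
        by_cases hxc : x.1 = c
        · have hnil : (y :: ys).filter (fun z => z.1 == c) = [] := by
            apply List.filter_eq_nil_iff.mpr
            intro z hz
            have hle : y.1 ≤ z.1 := by
              rcases List.mem_cons.mp hz with h | h
              · exact h ▸ le_refl _
              · exact hy _ h
            have hcz : c < z.1 := lt_of_lt_of_le (hxc ▸ hlt) hle
            simpa [beq_iff_eq] using (ne_of_gt hcz)
          rw [List.filter_cons]
          simp [hnil, hxc]
        · rw [List.filter_cons]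
          simp [hxc]
      · simp only [PySem.List.insertBy, hlt, decide_false, Bool.false_eq_true, if_false]
        rw [List.filter_cons, List.filter_cons, ih hys']
        by_cases h1 : x.1 = c <;> by_cases h2 : (y.1 == c) = true <;>
          simp [h1, h2]

-- Stability of Python's sort: filtering one key class commutes with sorting by that key.
theorem pv_stable_filter (qs : List (String × String)) (c : String) :
    (PySem.List.sorted qs (fun x => x.1) false).filter (fun z => z.1 == c) =
      qs.filter (fun z => z.1 == c) := by
  induction qs using List.reverseRecOn with
  | nil => rfl
  | append_singleton xs x ih =>
      rw [PySem.List.sorted_eq_foldl_insertBy, List.foldl_append, List.foldl_cons, List.foldl_nil,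
        ← PySem.List.sorted_eq_foldl_insertBy]
      rw [pv_filter_insertBy c x _ (PySem.List.sorted_pairwise xs (fun p => p.1)), ih]
      rw [List.filter_append]
      by_cases h : x.1 = c <;> simp [h]

-- keys of the dropWhile suffix are strictly above the head key
theorem pv_drop_gt (p1 : String) (rest : List (String × String))
    (hp : rest.Pairwise (fun a b => a.1 ≤ b.1)) (hle : ∀ q ∈ rest, p1 ≤ q.1) :
    ∀ q ∈ rest.dropWhile (fun q => q.1 == p1), p1 < q.1 := by
  induction rest with
  | nil => simp
  | cons r rs ih =>
      rcases List.pairwise_cons.mp hp with ⟨hr, hp'⟩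
      by_cases h : (r.1 == p1) = true
      · rw [List.dropWhile_cons, if_pos h]
        exact ih hp' (fun q hq => hle q (List.mem_cons_of_mem _ hq))
      · rw [List.dropWhile_cons, if_neg h]
        intro q hq
        have hrp : p1 < r.1 :=
          lt_of_le_of_ne (hle r List.mem_cons_self) (fun e => h (by simp [e]))
        rcases List.mem_cons.mp hq with e | hq'
        · exact e ▸ hrp
        · exact lt_of_lt_of_le hrp (hr q hq')

theorem pv_discard_of_not_mem (a : String) (l : List String) (h : a ∉ l) :
    (PySem.Set.ofList l).discard a = PySem.List.dedup l := by
  simp only [PySem.Set.discard, PySem.List.dedup_eq_ofList]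
  apply List.filter_eq_self.mpr
  intro x hx
  have : x ∈ l := (PySem.Set.mem_ofList _ _).mp hx
  simp
  exact fun e => h (e ▸ this)

theorem pv_dedup_cons_run (a : String) (l1 l2 : List String)
    (h1 : ∀ x ∈ l1, x = a) (h2 : a ∉ l2) :
    PySem.List.dedup (a :: (l1 ++ l2)) = a :: PySem.List.dedup l2 := by
  induction l1 with
  | nil =>
      simp only [List.nil_append, PySem.List.dedup_eq_ofList, PySem.Set.ofList_cons]
      rw [pv_discard_of_not_mem a l2 h2]
      simp [PySem.List.dedup_eq_ofList]
  | cons x l1 ih =>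
      have hxa : x = a := h1 x List.mem_cons_self
      subst hxa
      have : PySem.List.dedup (x :: ((x :: l1) ++ l2)) = PySem.List.dedup (x :: (l1 ++ l2)) := by
        simp only [PySem.List.dedup_eq_ofList, List.cons_append, PySem.Set.ofList_cons]
        congr 1
        simp [PySem.Set.discard, List.filter_filter]
      rw [this, ih (fun y hy => h1 y (List.mem_cons_of_mem _ hy))]

-- groupby over a key-sorted list, characterised: distinct keys (first occurrences) each with its value class
theorem pv_runs_eq (s : List (String × String)) (hs : s.Pairwise (fun a b => a.1 ≤ b.1)) :
    pvRuns s = (PySem.List.dedup (s.map (fun p => p.1))).map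
      (fun k => (k, (s.filter (fun p => p.1 == k)).map (fun p => p.2))) := by
  induction s using pvRuns.induct with
  | case1 => simp [pvRuns]
  | case2 p rest ih =>
      rcases List.pairwise_cons.mp hs with ⟨hle, hrest⟩
      set t := rest.takeWhile (fun q => q.1 == p.1) with ht_def
      set d := rest.dropWhile (fun q => q.1 == p.1) with hd_def
      have hsplit : rest = t ++ d := (List.takeWhile_append_dropWhile).symm
      have ht : ∀ q ∈ t, q.1 = p.1 := by
        intro q hq
        have := List.mem_takeWhile_imp hq
        simpa [beq_iff_eq] using this
      have hd : ∀ q ∈ d, p.1 < q.1 := pv_drop_gt p.1 rest hrest hle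
      have hdpair : d.Pairwise (fun a b => a.1 ≤ b.1) :=
        List.Pairwise.sublist (List.dropWhile_sublist _) hrest
      have hkeys : PySem.List.dedup ((p :: rest).map (fun q => q.1)) =
          p.1 :: PySem.List.dedup (d.map (fun q => q.1)) := by
        rw [hsplit]
        simp only [List.map_cons, List.map_append]
        apply pv_dedup_cons_run
        · intro x hx
          rcases List.mem_map.mp hx with ⟨q, hq, rfl⟩
          exact ht q hq
        · intro hmem
          rcases List.mem_map.mp hmem with ⟨q, hq, he⟩
          exact (ne_of_gt (hd q hq)) he
      have hfilt_head : (p :: rest).filter (fun q => q.1 == p.1) = p :: t := by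
        rw [hsplit, List.filter_cons]
        simp only [beq_self_eq_true, if_pos]
        rw [List.filter_append]
        have h1 : t.filter (fun q => q.1 == p.1) = t :=
          List.filter_eq_self.mpr (fun q hq => by simp [ht q hq])
        have h2 : d.filter (fun q => q.1 == p.1) = [] :=
          List.filter_eq_nil_iff.mpr (fun q hq => by simp; exact (ne_of_gt (hd q hq)))
        rw [h1, h2, List.append_nil]
      have hfilt_tail : ∀ k, p.1 < k →
          (p :: rest).filter (fun q => q.1 == k) = d.filter (fun q => q.1 == k) := by
        intro k hk
        rw [hsplit, List.filter_cons]
        have hp : (p.1 == k) = false := by simp; exact (ne_of_lt hk)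
        rw [if_neg (by simp [hp])]
        rw [List.filter_append]
        have h1 : t.filter (fun q => q.1 == k) = [] :=
          List.filter_eq_nil_iff.mpr (fun q hq => by
            simp [ht q hq]; exact (ne_of_lt hk))
        rw [h1, List.nil_append]
      rw [pvRuns, hkeys, List.map_cons]
      congr 1
      · rw [hfilt_head, List.map_cons, ← ht_def]
      · rw [ih hdpair]
        apply List.map_congr_left
        intro k hk
        have hkd : k ∈ d.map (fun q => q.1) := (PySem.List.mem_dedup _ _).mp hk
        rcases List.mem_map.mp hkd with ⟨q, hq, rfl⟩
        rw [hfilt_tail q.1 (hd q hq)]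

-- the first occurrences of the keys of a key-sorted list are strictly increasing
theorem pv_dedup_sorted_lt (s : List (String × String)) (hs : s.Pairwise (fun a b => a.1 ≤ b.1)) :
    (PySem.List.dedup (s.map (fun p => p.1))).Pairwise (· < ·) := by
  induction s using pvRuns.induct with
  | case1 => simp [PySem.List.dedup_eq_ofList, PySem.Set.ofList]
  | case2 p rest ih =>
      rcases List.pairwise_cons.mp hs with ⟨hle, hrest⟩
      set t := rest.takeWhile (fun q => q.1 == p.1) with ht_def
      set d := rest.dropWhile (fun q => q.1 == p.1) with hd_def
      have hsplit : rest = t ++ d := (List.takeWhile_append_dropWhile).symm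
      have ht : ∀ q ∈ t, q.1 = p.1 := by
        intro q hq
        have := List.mem_takeWhile_imp hq
        simpa [beq_iff_eq] using this
      have hd : ∀ q ∈ d, p.1 < q.1 := pv_drop_gt p.1 rest hrest hle
      have hdpair : d.Pairwise (fun a b => a.1 ≤ b.1) :=
        List.Pairwise.sublist (List.dropWhile_sublist _) hrest
      have hkeys : PySem.List.dedup ((p :: rest).map (fun q => q.1)) =
          p.1 :: PySem.List.dedup (d.map (fun q => q.1)) := by
        rw [hsplit]
        simp only [List.map_cons, List.map_append]
        apply pv_dedup_cons_run
        · intro x hx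
          rcases List.mem_map.mp hx with ⟨q, hq, rfl⟩
          exact ht q hq
        · intro hmem
          rcases List.mem_map.mp hmem with ⟨q, hq, he⟩
          exact (ne_of_gt (hd q hq)) he
      rw [hkeys]
      apply List.pairwise_cons.mpr
      refine ⟨?_, ih hdpair⟩
      intro k hk
      have hkd : k ∈ d.map (fun q => q.1) := (PySem.List.mem_dedup _ _).mp hk
      rcases List.mem_map.mp hkd with ⟨q, hq, rfl⟩
      exact hd q hq

theorem pv_main (qs : List (String × String)) :
    map_query_params_list_to_dict qs = map_query_params_list_to_dict_alt qs := by
  show ((pvRuns (PySem.List.sorted qs (fun x => x.1) false)).foldl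
        (fun d p => d.insert p.1 p.2) PySem.Dict.empty).items =
    (PySem.List.sorted
        (qs.foldl (fun d p => d.modify p.1 [] (fun l => l ++ [p.2])) PySem.Dict.empty).keys
        (fun k => k) false).map
      (fun k => (k, (qs.foldl (fun d p => d.modify p.1 [] (fun l => l ++ [p.2]))
          PySem.Dict.empty).getD k []))
  set s := PySem.List.sorted qs (fun x => x.1) false with hs_def
  have hs : s.Pairwise (fun a b => a.1 ≤ b.1) := PySem.List.sorted_pairwise qs (fun p => p.1)
  set K := PySem.List.dedup (s.map (fun p => p.1)) with hK_def
  have hruns : pvRuns s = K.map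
      (fun k => (k, (s.filter (fun p => p.1 == k)).map (fun p => p.2))) := pv_runs_eq s hs
  have hKnodup : K.Nodup := by
    rw [hK_def, PySem.List.dedup_eq_ofList]; exact PySem.Set.nodup_ofList _
  -- A side: the dict comprehension over groups with distinct keys just lists them
  have hA : ((pvRuns s).foldl (fun d p => d.insert p.1 p.2) PySem.Dict.empty).items
      = pvRuns s := by
    rw [PySem.Dict.items_foldl_insert_fresh (pvRuns s) (fun p => p.1) (fun p => p.2)
      PySem.Dict.empty (fun a _ => PySem.Dict.contains_empty _)
      (by rw [hruns, List.map_map]; simpa [Function.comp_def] using hKnodup)]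
    simp [show (PySem.Dict.empty : PySem.Dict String (List String)).items = [] from rfl]
  -- B side: the grouping dict
  have hkeys : (qs.foldl (fun d p => d.modify p.1 [] (fun l => l ++ [p.2]))
      PySem.Dict.empty).keys = PySem.Set.ofList (qs.map (fun p => p.1)) := by
    rw [PySem.Dict.keys_foldl_modify_key qs (fun p => p.1) [] (fun _ p => fun l => l ++ [p.2])
      PySem.Dict.empty]
    exact PySem.Set.update_empty _
  have hgetD : ∀ k, (qs.foldl (fun d p => d.modify p.1 [] (fun l => l ++ [p.2]))
      PySem.Dict.empty).getD k [] = (qs.filter (fun p => p.1 == k)).map (fun p => p.2) := by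
    intro k
    rw [PySem.Dict.getD_foldl_modify_append qs PySem.Dict.empty k]
    simp
  -- the sorted distinct keys coincide
  have hsortK : PySem.List.sorted (qs.foldl (fun d p => d.modify p.1 [] (fun l => l ++ [p.2]))
      PySem.Dict.empty).keys (fun k => k) false = K := by
    rw [hkeys]
    apply PySem.List.sorted_eq_of_perm_of_pairwise_lt
    · apply (List.perm_ext_iff_of_nodup hKnodup (PySem.Set.nodup_ofList _)).mpr
      intro k
      rw [PySem.Set.mem_ofList]
      rw [hK_def, PySem.List.mem_dedup]
      constructor
      · intro h
        rcases List.mem_map.mp h with ⟨q, hq, rfl⟩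
        exact List.mem_map_of_mem ((PySem.List.sorted_perm qs _ _).mem_iff.mp hq)
      · intro h
        rcases List.mem_map.mp h with ⟨q, hq, rfl⟩
        exact List.mem_map_of_mem ((PySem.List.sorted_perm qs (fun x => x.1) false).mem_iff.mpr hq)
    · exact pv_dedup_sorted_lt s hs
  rw [hA, hruns, hsortK]
  apply List.map_congr_left
  intro k _
  rw [hgetD k, hs_def, pv_stable_filter qs k]

-- ===== VERDICT (by name: the statement is the Claim_ definition above) =====
theorem map_query_params_list_to_dict_spec : Claim_equal_map_query_params_list_to_dict := by
  intro qs _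
  unfold Spec_map_query_params_list_to_dict
  exact pv_main qs
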